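-- pv_equiv track=rewrite | github.com/Fondamenti18/fondamenti-di-programmazione | students/1697736/homework01/program03.py | ripulisci
-- ===== SOURCE A (Python) =====
-- def pulisci(s):
--     noa = ""
--     for c in s:
--         if c.isalpha() and c >= "a" and c <= "z":
--             noa += c
--     return noa
--
-- def ripulisci(s):
--     fin = []
--     noa = pulisci(s)
--     ret = ""
--     last = 0
--     for i,c in enumerate(noa):
--         last = i
--         for j,a in enumerate(noa):
--             if j > last and c == a:
--                 last = j;
--         if i>= last and c not in ret:
--             ret += noa[last]
--     for el in ret:
--         fin.append(el)
--     return fin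
-- ===== SOURCE B (Python) =====
-- def ripulisci(s):
--     noa = [c for c in s if 'a' <= c <= 'z']
--     seen = set()
--     rev = []
--     for c in reversed(noa):
--         if c not in seen:
--             seen.add(c)
--             rev.append(c)
--     rev.reverse()
--     return rev
-- ===== Notes on version B (the rewrite author's own statement) =====
-- stated objective: simpler
-- what changed: B replaces A's nested forward scan (for each position, an inner pass over the whole cleaned string to find the last occurrence) by a single backward pass over the cleaned letters with a seen-set, collecting each letter at its first encounter from the right and reversing the result.
import Mathlib
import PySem

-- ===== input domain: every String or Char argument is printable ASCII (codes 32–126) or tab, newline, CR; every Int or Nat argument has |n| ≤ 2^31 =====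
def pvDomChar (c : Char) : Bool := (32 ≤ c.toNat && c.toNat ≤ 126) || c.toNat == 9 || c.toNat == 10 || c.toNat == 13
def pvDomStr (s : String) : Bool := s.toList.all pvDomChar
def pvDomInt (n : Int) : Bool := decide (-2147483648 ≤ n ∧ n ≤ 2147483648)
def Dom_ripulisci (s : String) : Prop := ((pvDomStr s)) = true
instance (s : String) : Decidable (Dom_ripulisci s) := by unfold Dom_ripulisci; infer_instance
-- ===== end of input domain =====

-- B: one backward pass with a seen-set instead of A's nested forward last-occurrence scan (order of last occurrence preserved).


-- ===== PORT A =====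
-- pulisci: noa = ""; for c in s: if c.isalpha() and c >= "a" and c <= "z": noa += c
def pulisci (s : String) : List Char :=
  s.toList.foldl
    (fun noa c =>
      if PySem.Chars.isalpha c && decide ('a' ≤ c) && decide (c ≤ 'z') then noa ++ [c] else noa)
    []

-- ripulisci: loop state is (ret, last); the inner loop over enumerate(noa) recomputes last;
-- noa[last] is always in range here, ported as pyGetD with an unused default.
def ripulisci (s : String) : List String :=
  let noa := pulisci s
  let ret :=
    ((PySem.List.enumerate noa 0).foldl
      (fun (st : List Char × Int) p =>
        let last := p.1
        let last :=
          (PySem.List.enumerate noa 0).foldl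
            (fun last q => if last < q.1 ∧ p.2 = q.2 then q.1 else last) last
        if last ≤ p.1 ∧ p.2 ∉ st.1 then (st.1 ++ [PySem.List.pyGetD noa last ' '], last)
        else (st.1, last))
      ([], 0)).1
  ret.map (fun c => String.ofList [c])

-- ===== PORT B =====
def ripulisci_alt (s : String) : List String :=
  let noa := s.toList.filter (fun c => decide ('a' ≤ c) && decide (c ≤ 'z'))
  let p :=
    noa.reverse.foldl
      (fun (p : PySem.Set Char × List Char) c =>
        if c ∈ p.1 then p else (PySem.Set.add p.1 c, p.2 ++ [c]))
      (PySem.Set.empty, [])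
  p.2.reverse.map (fun c => String.ofList [c])

-- ===== PRECONDITION & SPEC =====
def Spec_ripulisci (s : String) (out : List String) : Prop := out = ripulisci_alt s
instance (s : String) (out : List String) : Decidable (Spec_ripulisci s out) := by unfold Spec_ripulisci; infer_instance

-- ===== CLAIM (what is proved, stated in full; the proofs are below) =====
def Claim_equal_ripulisci : Prop := ∀ (s : String), Dom_ripulisci s → Spec_ripulisci s (ripulisci s)

-- ===== LEMMAS AND PROOFS =====

-- canonical form: each letter kept at its last occurrence, letters in m skipped
def keepLast (m : List Char) : List Char → List Char
  | [] => []
  | c :: t => if c ∈ m ∨ c ∈ t then keepLast m t else c :: keepLast m t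

-- first-occurrence keep, relative to an already-seen list m
def keepFirst (m : List Char) : List Char → List Char
  | [] => []
  | c :: t => if c ∈ m then keepFirst m t else c :: keepFirst (c :: m) t

-- a char in the range 'a'..'z' is alphabetic, so A's isalpha conjunct is redundant
lemma pred_eq (c : Char) :
    (PySem.Chars.isalpha c && decide ('a' ≤ c) && decide (c ≤ 'z'))
      = (decide ('a' ≤ c) && decide (c ≤ 'z')) := by
  by_cases h1 : 'a' ≤ c
  · by_cases h2 : c ≤ 'z'
    · have ha : PySem.Chars.isalpha c = true := by
        simp [PySem.Chars.isalpha, PySem.Chars.islower]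
        right
        exact ⟨h1, h2⟩
      simp [ha]
    · simp [h2]
  · simp [h1]

lemma pulisci_eq_filter (s : String) :
    pulisci s = s.toList.filter (fun c => decide ('a' ≤ c) && decide (c ≤ 'z')) := by
  unfold pulisci
  simp only [pred_eq]
  rw [PySem.List.foldl_append_if_eq_filter]
  simp

lemma inner_ge (ps : List (Int × Char)) (c : Char) (i : Int) :
    i ≤ ps.foldl (fun last q => if last < q.1 ∧ c = q.2 then q.1 else last) i := by
  induction ps generalizing i with
  | nil => exact le_refl _
  | cons q t ih =>
    simp only [List.foldl_cons]
    split_ifs with h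
    · exact le_trans (le_of_lt h.1) (ih _)
    · exact ih _

lemma inner_eq_iff (ps : List (Int × Char)) (c : Char) (i : Int) :
    ps.foldl (fun last q => if last < q.1 ∧ c = q.2 then q.1 else last) i = i ↔
      ∀ q ∈ ps, i < q.1 → c ≠ q.2 := by
  induction ps generalizing i with
  | nil => simp
  | cons q t ih =>
    simp only [List.foldl_cons, List.mem_cons]
    split_ifs with h
    · constructor
      · intro he
        have := inner_ge t c q.1
        omega
      · intro hall
        exact absurd h.2 (hall q (Or.inl rfl) h.1)
    · rw [ih]
      constructor
      · intro hall r hr hi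
        rcases hr with rfl | hr
        · intro he; exact h ⟨hi, he⟩
        · exact hall r hr hi
      · intro hall r hr hi
        exact hall r (Or.inr hr) hi

lemma outerA (noa : List Char) (l : List Char) :
    ∀ (k : Nat) (ret : List Char) (last0 : Int),
      noa.drop k = l → (∀ a ∈ ret, a ∉ l) →
      ((PySem.List.enumerate l (k : Int)).foldl
        (fun (st : List Char × Int) p =>
          let last := p.1
          let last :=
            (PySem.List.enumerate noa 0).foldl
              (fun last q => if last < q.1 ∧ p.2 = q.2 then q.1 else last) last
          if last ≤ p.1 ∧ p.2 ∉ st.1 then (st.1 ++ [PySem.List.pyGetD noa last ' '], last)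
          else (st.1, last))
        (ret, last0)).1 = ret ++ keepLast [] l := by
  induction l with
  | nil => intro k ret last0 _ _; simp [PySem.List.enumerate, keepLast]
  | cons c t ih =>
    intro k ret last0 hdrop hret
    have hk : k < noa.length := by
      by_contra hk
      rw [List.drop_eq_nil_of_le (by omega)] at hdrop
      exact List.cons_ne_nil _ _ hdrop.symm
    have hget : noa[k] = c := by
      have h0 : (noa.drop k)[0]'(by rw [hdrop]; simp) = c := by simp [hdrop]
      simpa using h0
    have hdropt : noa.drop (k + 1) = t := by
      have : (noa.drop k).drop 1 = noa.drop (k + 1) := by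
        rw [List.drop_drop]
      rw [← this, hdrop]; rfl
    rw [PySem.List.enumerate_cons]
    simp only [List.foldl_cons]
    have hge : ((k : Int)) ≤ (PySem.List.enumerate noa 0).foldl
        (fun last q => if last < q.1 ∧ c = q.2 then q.1 else last) (k : Int) := inner_ge _ _ _
    have hiff : ((PySem.List.enumerate noa 0).foldl
        (fun last q => if last < q.1 ∧ c = q.2 then q.1 else last) (k : Int) = (k : Int)) ↔ c ∉ t := by
      rw [inner_eq_iff]
      constructor
      · intro hall hc
        obtain ⟨j, hj, hjc⟩ := List.mem_iff_getElem.mp hc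
        have hj' : k + 1 + j < noa.length := by
          have := hj; rw [← hdropt] at this; simp [List.length_drop] at this; omega
        have hq : ((0 : Int) + (↑(k+1+j) : Int), noa[k+1+j]) ∈ PySem.List.enumerate noa 0 :=
          (PySem.List.mem_enumerate_iff _ _ _).mpr ⟨k+1+j, hj', rfl⟩
        have hval : noa[k+1+j] = c := by
          have h1 : (noa.drop (k+1))[j]? = noa[(k+1)+j]? := List.getElem?_drop
          rw [hdropt, List.getElem?_eq_getElem hj, List.getElem?_eq_getElem hj'] at h1
          rw [← Option.some.inj h1, hjc]
        exact hall _ hq (by push_cast; omega) hval.symm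
      · intro hc q hq hgt he
        obtain ⟨m, hm, rfl⟩ := (PySem.List.mem_enumerate_iff _ _ _).mp hq
        simp only at hgt he
        have hkm : k < m := by omega
        apply hc
        rw [he]
        have h1 : (noa.drop (k+1))[m - (k+1)]? = noa[(k+1)+(m-(k+1))]? := List.getElem?_drop
        rw [hdropt, show (k+1)+(m-(k+1)) = m by omega, List.getElem?_eq_getElem hm] at h1
        exact List.mem_of_getElem? h1
    by_cases hct : c ∈ t
    · have hne : ¬ ((PySem.List.enumerate noa 0).foldl
          (fun last q => if last < q.1 ∧ c = q.2 then q.1 else last) (k : Int) ≤ (k : Int) ∧ c ∉ ret) := by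
        intro hcl
        exact (hiff.mp (le_antisymm hcl.1 hge)) hct
      rw [if_neg hne]
      have := ih (k+1) ret ((PySem.List.enumerate noa 0).foldl
          (fun last q => if last < q.1 ∧ c = q.2 then q.1 else last) (k : Int)) hdropt
          (fun a ha => fun hmem => hret a ha (List.mem_cons_of_mem _ hmem))
      push_cast at this ⊢
      rw [this]
      simp [keepLast, hct]
    · have hin : (PySem.List.enumerate noa 0).foldl
          (fun last q => if last < q.1 ∧ c = q.2 then q.1 else last) (k : Int) = (k : Int) := hiff.mpr hct
      have hcr : c ∉ ret := fun h => hret c h (List.mem_cons_self)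
      rw [if_pos ⟨le_of_eq hin, hcr⟩, hin]
      have hgetD : PySem.List.pyGetD noa (k : Int) ' ' = c := by
        rw [PySem.List.pyGetD_natCast]
        rw [List.getD_eq_getElem _ _ hk]
        exact hget
      rw [hgetD]
      have := ih (k+1) (ret ++ [c]) ((k : Int)) hdropt (by
        intro a ha hmem
        rcases List.mem_append.mp ha with h | h
        · exact hret a h (List.mem_cons_of_mem _ hmem)
        · simp at h; subst h; exact hct hmem)
      push_cast at this ⊢
      rw [this]
      simp [keepLast, hct]

lemma foldB (l : List Char) :
    ∀ (sAcc : PySem.Set Char) (acc m : List Char), (∀ x, x ∈ sAcc ↔ x ∈ m) →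
      (l.foldl
        (fun (p : PySem.Set Char × List Char) c =>
          if c ∈ p.1 then p else (PySem.Set.add p.1 c, p.2 ++ [c]))
        (sAcc, acc)).2 = acc ++ keepFirst m l := by
  induction l with
  | nil => intro sAcc acc m _; simp [keepFirst]
  | cons c t ih =>
    intro sAcc acc m hm
    simp only [List.foldl_cons, keepFirst]
    by_cases hc : c ∈ m
    · rw [if_pos ((hm c).mpr hc), if_pos hc]
      exact ih sAcc acc m hm
    · rw [if_neg (fun h => hc ((hm c).mp h)), if_neg hc]
      rw [ih (PySem.Set.add sAcc c) (acc ++ [c]) (c :: m)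
        (by intro x; rw [PySem.Set.mem_add, hm x, List.mem_cons]; tauto)]
      simp

lemma keepFirst_append_singleton (xs : List Char) :
    ∀ (m : List Char) (c : Char),
      keepFirst m (xs ++ [c]) = keepFirst m xs ++ (if c ∈ m ∨ c ∈ xs then [] else [c]) := by
  induction xs with
  | nil =>
    intro m c
    by_cases h : c ∈ m <;> simp [keepFirst, h]
  | cons x t ih =>
    intro m c
    simp only [List.cons_append, keepFirst]
    by_cases hx : x ∈ m
    · rw [if_pos hx, if_pos hx, ih]
      congr 1
      by_cases h1 : c ∈ m <;> by_cases h2 : c ∈ t <;> by_cases h3 : c = x <;> simp_all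
    · rw [if_neg hx, if_neg hx, ih]
      simp only [List.cons_append, List.mem_cons]
      congr 1
      by_cases h1 : c ∈ m <;> by_cases h2 : c ∈ t <;> by_cases h3 : c = x <;> simp_all

lemma keepFirst_reverse (l : List Char) (m : List Char) :
    keepFirst m l.reverse = (keepLast m l).reverse := by
  induction l with
  | nil => simp [keepFirst, keepLast]
  | cons c t ih =>
    simp only [List.reverse_cons, keepLast]
    rw [keepFirst_append_singleton, ih]
    by_cases h : c ∈ m ∨ c ∈ t
    · rw [if_pos (by simpa using h), if_pos h]
      simp
    · rw [if_neg (by simpa using h), if_neg h]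
      simp

-- ===== VERDICT (by name: the statement is the Claim_ definition above) =====
theorem ripulisci_spec : Claim_equal_ripulisci := by
  intro s _
  unfold Spec_ripulisci
  simp only [ripulisci, ripulisci_alt, pulisci_eq_filter]
  have hA := outerA (s.toList.filter (fun c => decide ('a' ≤ c) && decide (c ≤ 'z')))
      (s.toList.filter (fun c => decide ('a' ≤ c) && decide (c ≤ 'z'))) 0 [] 0 (by simp) (by simp)
  have hB := foldB (s.toList.filter (fun c => decide ('a' ≤ c) && decide (c ≤ 'z'))).reverse
      PySem.Set.empty [] [] (by intro x; simp [PySem.Set.empty])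
  rw [keepFirst_reverse] at hB
  push_cast at hA
  rw [hA, hB]
  simp
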